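-- pv_equiv track=rewrite | github.com/carmelly/peeps-scheduler | tests/validation/test_fields.py | _build_domain
-- ===== SOURCE A (Python) =====
-- def _build_domain(total_len: int) -> str:
--     labels = []
--     remaining = total_len
--     while remaining > 63:
--         labels.append("d" * 63)
--         remaining -= 64
--     labels.append("d" * remaining)
--     return ".".join(labels)
-- ===== SOURCE B (Python) =====
-- def _build_domain(total_len: int) -> str:
--     return "".join("." if (i + 1) % 64 == 0 else "d" for i in range(total_len))
-- ===== Notes on version B (the rewrite author's own statement) =====
-- stated objective: idiomatic
-- what changed: Replaces the block-building while-loop over 'remaining' with a single per-position comprehension joined once: position i is '.' exactly when (i+1) % 64 == 0, else 'd'.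
import Mathlib
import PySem

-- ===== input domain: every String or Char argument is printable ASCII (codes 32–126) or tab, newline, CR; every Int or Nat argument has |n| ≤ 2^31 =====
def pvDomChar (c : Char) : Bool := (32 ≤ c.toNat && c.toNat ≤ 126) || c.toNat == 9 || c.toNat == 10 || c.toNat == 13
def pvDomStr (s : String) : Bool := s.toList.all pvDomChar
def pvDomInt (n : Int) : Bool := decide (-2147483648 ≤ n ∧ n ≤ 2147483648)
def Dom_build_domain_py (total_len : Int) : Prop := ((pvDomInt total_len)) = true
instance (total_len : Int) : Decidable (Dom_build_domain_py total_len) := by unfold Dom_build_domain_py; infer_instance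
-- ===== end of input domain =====

-- B builds the string per position ('.' exactly when (i+1) % 64 == 0) instead of A's
-- while-loop over blocks of 63 'd's joined by '.'; objective: idiomatic.

-- ===== PORT A =====
-- the while-loop: append "d"*63 blocks while remaining > 63, then the final "d"*remaining
def buildDomainLoop (labels : List String) (remaining : Int) : List String :=
  if remaining > 63 then
    buildDomainLoop (labels ++ [String.ofList (PySem.List.pyRepeat ['d'] 63)]) (remaining - 64)
  else
    labels ++ [String.ofList (PySem.List.pyRepeat ['d'] remaining)]
termination_by remaining.toNat
decreasing_by omega

def build_domain_py (total_len : Int) : String :=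
  PySem.Str.join "." (buildDomainLoop [] total_len)

-- ===== PORT B =====
def build_domain_py_alt (total_len : Int) : String :=
  PySem.Str.join ""
    ((PySem.List.pyRange 0 total_len 1).map
      (fun i => if PySem.Int.mod (i + 1) 64 == 0 then "." else "d"))

-- ===== PRECONDITION & SPEC =====
def Spec_build_domain_py (total_len : Int) (out : String) : Prop := out = build_domain_py_alt total_len
instance (total_len : Int) (out : String) : Decidable (Spec_build_domain_py total_len out) := by unfold Spec_build_domain_py; infer_instance

-- ===== CLAIM (what is proved, stated in full; the proofs are below) =====
def Claim_equal_build_domain_py : Prop := ∀ (total_len : Int), Dom_build_domain_py total_len → Spec_build_domain_py total_len (build_domain_py total_len)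

-- ===== LEMMAS AND PROOFS =====

-- the per-position character pattern both programs produce
def pvPat (n : Nat) : List Char :=
  (List.range n).map (fun i => if (i + 1) % 64 = 0 then '.' else 'd')

theorem pvPat_small (n : Nat) (h : n ≤ 63) : pvPat n = List.replicate n 'd' := by
  unfold pvPat
  rw [List.eq_replicate_iff]
  refine ⟨by simp, ?_⟩
  intro c hc
  simp only [List.mem_map, List.mem_range] at hc
  obtain ⟨i, hi, rfl⟩ := hc
  have hm : (i + 1) % 64 = i + 1 := Nat.mod_eq_of_lt (by omega)
  simp [hm]

theorem pvPat_big (n : Nat) (h : 64 ≤ n) :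
    pvPat n = List.replicate 63 'd' ++ '.' :: pvPat (n - 64) := by
  obtain ⟨m, rfl⟩ : ∃ m, n = 64 + m := ⟨n - 64, by omega⟩
  have hm : 64 + m - 64 = m := by omega
  rw [hm]
  unfold pvPat
  rw [List.range_add, List.map_append, List.map_map]
  have h1 : (List.range 64).map (fun i => if (i + 1) % 64 = 0 then '.' else 'd')
      = List.replicate 63 'd' ++ ['.'] := by decide
  have h2 : ((List.range m).map
        ((fun i => if (i + 1) % 64 = 0 then '.' else 'd') ∘ (fun j => 64 + j)))
      = (List.range m).map (fun i => if (i + 1) % 64 = 0 then '.' else 'd') := by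
    apply List.map_congr_left
    intro i _
    have hmm : (64 + i + 1) % 64 = (i + 1) % 64 := by omega
    simp [Function.comp, hmm]
  rw [h1, h2]
  simp

theorem pvLoop_append (r : Int) (labels : List String) :
    buildDomainLoop labels r = labels ++ buildDomainLoop [] r := by
  have H : ∀ (n : Nat) (r : Int), r.toNat ≤ n → ∀ labels,
      buildDomainLoop labels r = labels ++ buildDomainLoop [] r := by
    intro n
    induction n with
    | zero =>
      intro r hr labels
      conv_lhs => rw [buildDomainLoop]
      conv_rhs => rw [buildDomainLoop]
      have hng : ¬ r > 63 := by omega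
      simp [hng]
    | succ n IH =>
      intro r hr labels
      conv_lhs => rw [buildDomainLoop]
      conv_rhs => rw [buildDomainLoop]
      split_ifs with hg
      · rw [IH (r - 64) (by omega) (labels ++ [String.ofList (PySem.List.pyRepeat ['d'] 63)]),
            IH (r - 64) (by omega) ([] ++ [String.ofList (PySem.List.pyRepeat ['d'] 63)])]
        simp
      · simp
  exact H r.toNat r le_rfl labels

theorem pvLoop_ne_nil (r : Int) : buildDomainLoop [] r ≠ [] := by
  rw [buildDomainLoop]
  split_ifs with hg
  · rw [pvLoop_append]
    simp
  · simp

theorem pvA_base (r : Int) (h : ¬ r > 63) :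
    (build_domain_py r).toList = List.replicate r.toNat 'd' := by
  unfold build_domain_py
  rw [buildDomainLoop]
  simp [h, PySem.Chars.join_singleton, PySem.List.pyRepeat_singleton]

theorem pvA_step (r : Int) (h : r > 63) :
    (build_domain_py r).toList
      = List.replicate 63 'd' ++ '.' :: (build_domain_py (r - 64)).toList := by
  obtain ⟨x, xs, hx⟩ := List.exists_cons_of_ne_nil (pvLoop_ne_nil (r - 64))
  conv_lhs =>
    rw [build_domain_py, buildDomainLoop]
    rw [if_pos h, pvLoop_append, hx]
  simp only [List.nil_append, List.singleton_append]
  rw [PySem.Str.toList_join, List.map_cons, List.map_cons, PySem.Chars.join_cons_cons]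
  conv_rhs => rw [build_domain_py, hx]
  rw [PySem.Str.toList_join]
  simp [PySem.List.pyRepeat_singleton]

theorem pvA_toList (r : Int) : (build_domain_py r).toList = pvPat r.toNat := by
  have H : ∀ (n : Nat) (r : Int), r.toNat ≤ n →
      (build_domain_py r).toList = pvPat r.toNat := by
    intro n
    induction n with
    | zero =>
      intro r hr
      rw [pvA_base r (by omega), pvPat_small _ (by omega)]
    | succ n IH =>
      intro r hr
      by_cases hg : r > 63
      · have h64 : (r - 64).toNat = r.toNat - 64 := by omega
        rw [pvA_step r hg, IH (r - 64) (by omega), pvPat_big r.toNat (by omega), h64]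
      · rw [pvA_base r hg, pvPat_small _ (by omega)]
  exact H r.toNat r le_rfl

theorem pvB_toList (r : Int) : (build_domain_py_alt r).toList = pvPat r.toNat := by
  have key : ∀ i : Nat,
      (String.toList ∘ ((fun i : Int => if PySem.Int.mod (i + 1) 64 == 0 then "." else "d") ∘
        (fun k : Nat => (0 : Int) + ↑k))) i
      = ((fun c => [c]) ∘ (fun i : Nat => if (i + 1) % 64 = 0 then '.' else 'd')) i := by
    intro i
    have h0 : (0 : Int) + ↑i + 1 = ((i + 1 : Nat) : Int) := by push_cast; ring
    simp only [Function.comp]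
    rw [h0]
    have hmod : PySem.Int.mod ((i + 1 : Nat) : Int) 64 = (((i + 1) % 64 : Nat) : Int) := by
      simp [PySem.Int.mod, Int.fmod_eq_emod]
    rw [hmod]
    by_cases hc : (i + 1) % 64 = 0
    · simp [hc]
    · have hdvd : ¬ ((64 : Int) ∣ ↑i + 1) := by omega
      simp [hc, hdvd]
  rw [build_domain_py_alt, PySem.Str.toList_join, PySem.List.pyRange_one]
  simp only [Int.sub_zero, List.map_map]
  rw [List.map_congr_left (fun i _ => key i), ← List.map_map]
  have hj := PySem.Chars.join_nil_singletons
    ((List.range r.toNat).map (fun i : Nat => if (i + 1) % 64 = 0 then '.' else 'd'))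
  simpa [pvPat] using hj

-- ===== VERDICT (by name: the statement is the Claim_ definition above) =====
theorem build_domain_py_spec : Claim_equal_build_domain_py := by
  intro n _
  unfold Spec_build_domain_py
  exact String.toList_injective ((pvA_toList n).trans (pvB_toList n).symm)
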